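-- pv_equiv track=rewrite | github.com/testdata6/python-test | python3/example_transalte_with_case.py | translate2
-- ===== SOURCE A (Python) =====
-- def translate2(phrase):
--     translation = ""
--     for letter in phrase:
--         if letter.lower() in "aeg":
--             if letter.isupper():
--                 translation = translation + "J"
--             else:
--                 translation = translation + "j"
--         else:
--             translation = translation + letter
--     return translation
-- ===== SOURCE B (Python) =====
-- _TABLE = str.maketrans("aAeEgG", "jJjJjJ")
--
-- def translate2(phrase):
--     return phrase.translate(_TABLE)
-- ===== Notes on version B (the rewrite author's own statement) =====
-- stated objective: idiomatic
-- what changed: Replaces the explicit loop with per-character membership test, case branching and repeated string concatenation by a precomputed str.maketrans translation table applied in one phrase.translate pass.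
import Mathlib
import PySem

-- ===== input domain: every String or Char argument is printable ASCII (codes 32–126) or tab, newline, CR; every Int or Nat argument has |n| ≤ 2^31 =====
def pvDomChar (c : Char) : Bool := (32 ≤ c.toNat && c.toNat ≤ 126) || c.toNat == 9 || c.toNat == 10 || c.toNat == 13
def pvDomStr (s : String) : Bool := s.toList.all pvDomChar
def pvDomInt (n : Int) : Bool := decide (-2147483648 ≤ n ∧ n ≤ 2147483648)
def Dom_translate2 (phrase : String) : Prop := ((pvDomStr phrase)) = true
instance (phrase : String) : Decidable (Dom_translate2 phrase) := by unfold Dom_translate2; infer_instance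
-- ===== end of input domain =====

-- B replaces A's explicit loop with membership test and case branching by a
-- precomputed translation table applied in a single pass (idiomatic str.translate).


-- ===== PORT A =====
-- literal transliteration: accumulate a string, per letter test `letter.lower() in "aeg"`
-- (a single character, so substring membership = list membership) and branch on isupper
def translate2 (phrase : String) : String :=
  phrase.toList.foldl
    (fun translation letter =>
      if ['a', 'e', 'g'].contains (PySem.Chars.lowerChar letter) then
        if PySem.Chars.isupper letter then translation ++ "J" else translation ++ "j"
      else
        translation ++ String.ofList [letter])
    ""

-- ===== PORT B =====
-- the str.maketrans table, as an association list Char → Char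
def pvTable : List (Char × Char) :=
  [('a', 'j'), ('A', 'J'), ('e', 'j'), ('E', 'J'), ('g', 'j'), ('G', 'J')]

-- phrase.translate(table): one pass mapping each character through the table
def translate2_alt (phrase : String) : String :=
  String.ofList (phrase.toList.map (fun c => ((pvTable.lookup c).getD c)))

-- ===== PRECONDITION & SPEC =====
def Spec_translate2 (phrase : String) (out : String) : Prop := out = translate2_alt phrase
instance (phrase : String) (out : String) : Decidable (Spec_translate2 phrase out) := by unfold Spec_translate2; infer_instance

-- ===== CLAIM (what is proved, stated in full; the proofs are below) =====
def Claim_equal_translate2 : Prop := ∀ (phrase : String), Dom_translate2 phrase → Spec_translate2 phrase (translate2 phrase)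

-- ===== LEMMAS AND PROOFS =====

-- the single-character translation performed by A's branches equals B's table lookup
theorem pv_char_eq (c : Char) :
    (if ['a', 'e', 'g'].contains (PySem.Chars.lowerChar c) then
       (if PySem.Chars.isupper c then 'J' else 'j')
     else c) = (pvTable.lookup c).getD c := by
  by_cases ha : c = 'a'; · subst ha; decide
  by_cases hA : c = 'A'; · subst hA; decide
  by_cases he : c = 'e'; · subst he; decide
  by_cases hE : c = 'E'; · subst hE; decide
  by_cases hg : c = 'g'; · subst hg; decide
  by_cases hG : c = 'G'; · subst hG; decide
  have hlook : pvTable.lookup c = none := by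
    have b1 : (c == 'a') = false := by simp [ha]
    have b2 : (c == 'A') = false := by simp [hA]
    have b3 : (c == 'e') = false := by simp [he]
    have b4 : (c == 'E') = false := by simp [hE]
    have b5 : (c == 'g') = false := by simp [hg]
    have b6 : (c == 'G') = false := by simp [hG]
    simp [pvTable, List.lookup, b1, b2, b3, b4, b5, b6]
  have hcon : (['a', 'e', 'g'].contains (PySem.Chars.lowerChar c)) = false := by
    rw [Bool.eq_false_iff]
    intro h
    by_cases hu : PySem.Chars.isupper c = true
    · have hup : 65 ≤ c.toNat ∧ c.toNat ≤ 90 := by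
        simp only [PySem.Chars.isupper, Bool.and_eq_true, decide_eq_true_eq] at hu
        obtain ⟨h1, h2⟩ := hu
        rw [Char.le_def] at h1 h2
        exact ⟨h1, h2⟩
      have hv : (Char.ofNat (c.toNat + 32)).toNat = c.toNat + 32 := by
        rw [Char.toNat_ofNat, if_pos]
        left; omega
      simp only [PySem.Chars.lowerChar, hu, if_true, List.contains_eq_mem,
        List.mem_cons, List.not_mem_nil, or_false, decide_eq_true_eq] at h
      have hn : c.toNat = 65 ∨ c.toNat = 69 ∨ c.toNat = 71 := by
        rcases h with h | h | h
        · left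
          have h2 := congrArg Char.toNat h
          rw [hv] at h2
          have e1 : ('a').toNat = 97 := rfl
          omega
        · right; left
          have h2 := congrArg Char.toNat h
          rw [hv] at h2
          have e1 : ('e').toNat = 101 := rfl
          omega
        · right; right
          have h2 := congrArg Char.toNat h
          rw [hv] at h2
          have e1 : ('g').toNat = 103 := rfl
          omega
      have hc := Char.ofNat_toNat c
      rcases hn with hn | hn | hn <;> rw [hn] at hc
      · exact hA hc.symm
      · exact hE hc.symm
      · exact hG hc.symm
    · simp only [PySem.Chars.lowerChar, hu, if_false, List.contains_eq_mem,
        List.mem_cons, List.not_mem_nil, or_false, decide_eq_true_eq,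
        Bool.false_eq_true] at h
      rcases h with h | h | h
      · exact ha h
      · exact he h
      · exact hg h
  simp only [hcon, Bool.false_eq_true, if_false, hlook, Option.getD_none]

-- A's fold, starting from any accumulator, appends the mapped characters
theorem pv_fold_eq (l : List Char) (acc : String) :
    (l.foldl
      (fun translation letter =>
        if ['a', 'e', 'g'].contains (PySem.Chars.lowerChar letter) then
          if PySem.Chars.isupper letter then translation ++ "J" else translation ++ "j"
        else
          translation ++ String.ofList [letter])
      acc).toList = acc.toList ++ l.map (fun c => ((pvTable.lookup c).getD c)) := by
  induction l generalizing acc with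
  | nil => simp
  | cons c t ih =>
    rw [List.foldl_cons, ih, List.map_cons, ← pv_char_eq c]
    split_ifs <;> simp

-- ===== VERDICT (by name: the statement is the Claim_ definition above) =====
theorem translate2_spec : Claim_equal_translate2 := by
  intro phrase _
  unfold Spec_translate2 translate2 translate2_alt
  apply String.ext
  rw [pv_fold_eq]
  simp
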